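-- pv_equiv track=rewrite | github.com/t-lou/text-proc | text_diff.py | parse_line_index
-- ===== SOURCE A (Python) =====
-- def parse_line_index(difference: str) -> list:
--     '''
--     With the difference hints from difflib, return the ranges for highlighting.
--
--     Arguments:
--         difference: the indicator for the difference.
--     Returns:
--         A list of start-end index.
--     '''
--     last_index = -1
--     ranges = []
--     target = '^'
--     for i, d in enumerate(difference[:-1]):
--         if last_index < 0 and d != ' ':
--             last_index = i
--         elif last_index >= 0 and d == ' ':
--             ranges.append((last_index, i))
--             last_index = -1
--     if last_index >= 0:
--         ranges.append((last_index, len(difference) - 1))  # last char is \n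
--     return ranges
-- ===== SOURCE B (Python) =====
-- def parse_line_index(difference: str) -> list:
--     '''Stateless re-implementation: detect run boundaries by comparing each
--     character of difference[:-1] with its neighbours, then zip starts with ends.'''
--     s = difference[:-1]
--     starts = [i for i, (c, prev) in enumerate(zip(s, ' ' + s)) if c != ' ' and prev == ' ']
--     ends = [i + 1 for i, (c, nxt) in enumerate(zip(s, s[1:] + ' ')) if c != ' ' and nxt == ' ']
--     return list(zip(starts, ends))
-- ===== Notes on version B (the rewrite author's own statement) =====
-- stated objective: alternative
-- what changed: A's single stateful scan with a last_index sentinel is replaced by stateless boundary detection: run starts and run ends are found by two neighbour-comparison filters over difference[:-1] and zipped into ranges.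
import Mathlib
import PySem

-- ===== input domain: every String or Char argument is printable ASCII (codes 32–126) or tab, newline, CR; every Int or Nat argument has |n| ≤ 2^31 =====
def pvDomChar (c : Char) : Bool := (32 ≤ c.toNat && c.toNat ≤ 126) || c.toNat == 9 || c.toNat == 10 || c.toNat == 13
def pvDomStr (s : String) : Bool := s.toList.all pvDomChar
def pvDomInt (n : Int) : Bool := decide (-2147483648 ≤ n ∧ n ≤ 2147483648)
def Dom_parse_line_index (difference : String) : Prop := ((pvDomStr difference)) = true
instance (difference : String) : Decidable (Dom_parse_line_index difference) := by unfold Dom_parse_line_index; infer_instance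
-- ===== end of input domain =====

-- B replaces A's stateful sentinel scan by stateless boundary detection (two
-- neighbour-comparison filters zipped together); objective: alternative, same cost.

-- ===== PORT A =====
def parse_line_index (difference : String) : List (Int × Int) :=
  let s := PySem.List.slice difference.toList none (some (-1))
  let st := (PySem.List.enumerate s).foldl
    (fun (acc : Int × List (Int × Int)) (p : Int × Char) =>
      if acc.1 < 0 ∧ p.2 ≠ ' ' then (p.1, acc.2)
      else if acc.1 ≥ 0 ∧ p.2 = ' ' then (-1, acc.2 ++ [(acc.1, p.1)])
      else acc) (-1, [])
  if st.1 ≥ 0 then st.2 ++ [(st.1, PySem.Str.len difference - 1)] else st.2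

-- ===== PORT B =====
def parse_line_index_alt (difference : String) : List (Int × Int) :=
  let s := PySem.List.slice difference.toList none (some (-1))
  let starts := ((PySem.List.enumerate (s.zip (' ' :: s))).filter
      (fun p => p.2.1 != ' ' && p.2.2 == ' ')).map (fun p => p.1)
  let ends := ((PySem.List.enumerate (s.zip (PySem.List.slice s (some 1) none ++ [' ']))).filter
      (fun p => p.2.1 != ' ' && p.2.2 == ' ')).map (fun p => p.1 + 1)
  starts.zip ends

-- ===== PRECONDITION & SPEC =====
def Spec_parse_line_index (difference : String) (out : List (Int × Int)) : Prop := out = parse_line_index_alt difference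
instance (difference : String) (out : List (Int × Int)) : Decidable (Spec_parse_line_index difference out) := by unfold Spec_parse_line_index; infer_instance

-- ===== CLAIM (what is proved, stated in full; the proofs are below) =====
def Claim_equal_parse_line_index : Prop := ∀ (difference : String), Dom_parse_line_index difference → Spec_parse_line_index difference (parse_line_index difference)

-- ===== LEMMAS AND PROOFS =====

-- run starts of t with offset k; b = "the previous char is a space (or start of string)"
def pvStarts : Bool → Int → List Char → List Int
  | _, _, [] => []
  | b, k, c :: t => (if c != ' ' && b then [k] else []) ++ pvStarts (c == ' ') (k + 1) t

-- run ends (exclusive) of t with offset k: a char ends a run iff non-space and followed by space/end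
def pvEnds : Int → List Char → List Int
  | _, [] => []
  | k, c :: t => (if c != ' ' && (t.headD ' ' == ' ') then [k + 1] else []) ++ pvEnds (k + 1) t

-- A's loop body, named (definitionally equal to the lambda in the port of A)
def pvStep (a : Int × List (Int × Int)) (p : Int × Char) : Int × List (Int × Int) :=
  if a.1 < 0 ∧ p.2 ≠ ' ' then (p.1, a.2)
  else if a.1 ≥ 0 ∧ p.2 = ' ' then (-1, a.2 ++ [(a.1, p.1)])
  else a

-- A's final append, named (definitionally equal to the final `if` in the port of A)
def pvFin (n : Int) (st : Int × List (Int × Int)) : List (Int × Int) :=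
  if st.1 ≥ 0 then st.2 ++ [(st.1, n)] else st.2

-- A's machine as a recursion: remaining chars, current index, pending start (-1 = none)
def pvMx : List Char → Int → Int → List (Int × Int)
  | [], k, last => if last ≥ 0 then [(last, k)] else []
  | c :: t, k, last =>
    if last < 0 ∧ c ≠ ' ' then pvMx t (k + 1) k
    else if last ≥ 0 ∧ c = ' ' then (last, k) :: pvMx t (k + 1) (-1)
    else pvMx t (k + 1) last

theorem pvMx_eq_zip : ∀ (t : List Char) (k last : Int), 0 ≤ k →
    pvMx t k last =
      if last < 0 then (pvStarts true k t).zip (pvEnds k t)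
      else ((last :: pvStarts false k t).zip
            ((if t.headD ' ' == ' ' then [k] else []) ++ pvEnds k t)) := by
  intro t
  induction t with
  | nil =>
    intro k last _
    by_cases h : last < 0 <;>
      simp [pvMx, pvStarts, pvEnds, h, show last < 0 → ¬ last ≥ 0 by omega,
        show ¬ last < 0 → last ≥ 0 by omega]
  | cons c t ih =>
    intro k last hk
    by_cases hl : last < 0 <;> by_cases hc : c = ' '
    · simp only [pvMx, pvStarts, pvEnds, hl, hc, show ¬ (last ≥ 0) by omega]
      rw [ih (k + 1) last (by omega)]
      simp [hl]
    · simp only [pvMx, pvStarts, pvEnds, hl, hc, show ¬ (last ≥ 0) by omega]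
      rw [ih (k + 1) k (by omega)]
      simp [hc, show ¬ ((k : Int) < 0) by omega, beq_eq_false_iff_ne.mpr hc]
    · simp only [pvMx, pvStarts, pvEnds, hl, hc, show last ≥ 0 by omega]
      rw [ih (k + 1) (-1) (by omega)]
      simp
    · simp only [pvMx, pvStarts, pvEnds, hl, hc, show last ≥ 0 by omega]
      rw [ih (k + 1) last (by omega)]
      simp [hl, hc, beq_eq_false_iff_ne.mpr hc]

theorem pvA_fold : ∀ (t : List Char) (k last : Int) (acc : List (Int × Int)),
    pvFin (k + t.length) ((PySem.List.enumerate t k).foldl pvStep (last, acc)) =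
      acc ++ pvMx t k last := by
  intro t
  induction t with
  | nil =>
    intro k last acc
    by_cases h : last ≥ 0 <;>
      simp [PySem.List.enumerate_nil, pvFin, pvMx, h]
  | cons c t ih =>
    intro k last acc
    rw [PySem.List.enumerate_cons, List.foldl_cons]
    have hlen : (k + ((c :: t).length : Int)) = (k + 1) + (t.length : Int) := by
      simp [List.length_cons]; ring
    rw [hlen]
    by_cases hl : last < 0 <;> by_cases hc : c = ' '
    · have hstep : pvStep (last, acc) (k, c) = (last, acc) := by
        simp [pvStep, hc, show ¬ (last ≥ 0) by omega]
      rw [hstep, ih (k + 1) last acc]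
      simp [pvMx, hl, hc, show ¬ (last ≥ 0) by omega]
    · have hstep : pvStep (last, acc) (k, c) = (k, acc) := by
        simp [pvStep, hl, hc]
      rw [hstep, ih (k + 1) k acc]
      simp [pvMx, hl, hc]
    · have hstep : pvStep (last, acc) (k, c) = (-1, acc ++ [(last, k)]) := by
        simp [pvStep, hl, hc, show last ≥ 0 by omega]
      rw [hstep, ih (k + 1) (-1) (acc ++ [(last, k)])]
      simp [pvMx, hl, hc, show last ≥ 0 by omega]
    · have hstep : pvStep (last, acc) (k, c) = (last, acc) := by
        simp [pvStep, hl, hc]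
      rw [hstep, ih (k + 1) last acc]
      simp [pvMx, hl, hc, show last ≥ 0 by omega]

theorem pvB_starts (t : List Char) : ∀ (p : Char) (k : Int),
    ((PySem.List.enumerate (t.zip (p :: t)) k).filter
        (fun q => q.2.1 != ' ' && q.2.2 == ' ')).map (fun q => q.1) = pvStarts (p == ' ') k t := by
  induction t with
  | nil => intro p k; simp [pvStarts, PySem.List.enumerate_nil]
  | cons c t ih =>
    intro p k
    rw [List.zip_cons_cons, PySem.List.enumerate_cons]
    by_cases hc : c = ' ' <;> by_cases hp : p = ' ' <;>
      simp [pvStarts, hc, hp, List.filter_cons, ih c (k + 1), *]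

theorem pv_zip_tail (c : Char) (t : List Char) :
    (c :: t).zip (t ++ [' ']) = (c, t.headD ' ') :: t.zip (t.tail ++ [' ']) := by
  cases t <;> simp

theorem pvB_ends (t : List Char) : ∀ (k : Int),
    ((PySem.List.enumerate (t.zip (t.tail ++ [' '])) k).filter
        (fun q => q.2.1 != ' ' && q.2.2 == ' ')).map (fun q => q.1 + 1) = pvEnds k t := by
  induction t with
  | nil => intro k; simp [pvEnds, PySem.List.enumerate_nil]
  | cons c t ih =>
    intro k
    rw [List.tail_cons, pv_zip_tail, PySem.List.enumerate_cons, List.filter_cons]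
    by_cases hc : c = ' ' <;> by_cases hh : t.head?.getD ' ' = ' ' <;>
      simp [pvEnds, List.headD_eq_head?_getD, hc, hh] <;>
      exact ih (k + 1)

-- ===== VERDICT (by name: the statement is the Claim_ definition above) =====
theorem parse_line_index_spec : Claim_equal_parse_line_index := by
  intro difference _
  unfold Spec_parse_line_index parse_line_index parse_line_index_alt
  show pvFin (PySem.Str.len difference - 1)
      ((PySem.List.enumerate (PySem.List.slice difference.toList none (some (-1)))).foldl pvStep (-1, [])) =
    (((PySem.List.enumerate ((PySem.List.slice difference.toList none (some (-1))).zip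
        (' ' :: PySem.List.slice difference.toList none (some (-1))))).filter
        (fun p => p.2.1 != ' ' && p.2.2 == ' ')).map (fun p => p.1)).zip
    (((PySem.List.enumerate ((PySem.List.slice difference.toList none (some (-1))).zip
        (PySem.List.slice (PySem.List.slice difference.toList none (some (-1))) (some 1) none ++ [' ']))).filter
        (fun p => p.2.1 != ' ' && p.2.2 == ' ')).map (fun p => p.1 + 1))
  rw [PySem.List.slice_to_neg_one, PySem.List.slice_from_one]
  rw [pvB_starts difference.toList.dropLast ' ' 0, pvB_ends difference.toList.dropLast 0]
  by_cases hD : difference.toList = []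
  · simp [hD, pvFin, pvStarts, pvEnds, PySem.List.enumerate_nil]
  · have hL : 1 ≤ difference.toList.length := by
      cases h : difference.toList with
      | nil => exact absurd h hD
      | cons a l => simp
    have hlen : PySem.Str.len difference - 1 = (0 : Int) + ((difference.toList.dropLast).length : Int) := by
      rw [PySem.Str.len_eq, List.length_dropLast, Nat.cast_sub hL]
      omega
    rw [hlen, pvA_fold difference.toList.dropLast 0 (-1) []]
    rw [pvMx_eq_zip difference.toList.dropLast 0 (-1) le_rfl]
    simp
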